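-- pv_equiv track=rewrite | github.com/Mark-Seaman/OLD-GhostWriter | chatterbox/pub_script.py | extract_outline
-- ===== SOURCE A (Python) =====
-- def extract_outline(text, section_number):
--     lines = text.split('\n')
--     outline = ''
--     matching = False
--     for line in lines:
--         i = len(line)-len(line.lstrip())
--         if matching == True:
--             if indent >= i:
--                 return outline
--             outline += line[indent:]+'\n'
--         elif line.lstrip().startswith(section_number):
--             matching = True
--             indent = i
--             outline += line[indent:]+'\n'
--     return outline
-- ===== SOURCE B (Python) =====
-- def extract_outline(text, section_number):
--     lines = text.split('\n')
--     indents = [len(l) - len(l.lstrip()) for l in lines]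
--     matches = [k for k, l in enumerate(lines) if l.lstrip().startswith(section_number)]
--     if not matches:
--         return ''
--     j = matches[0]
--     stop = next((k for k in range(j + 1, len(lines)) if indents[k] <= indents[j]), len(lines))
--     return ''.join(l[indents[j]:] + '\n' for l in lines[j:stop])
-- ===== Notes on version B (the rewrite author's own statement) =====
-- stated objective: alternative
-- what changed: A's single stateful streaming loop (matching flag, cross-iteration indent variable, early return, string concatenation) is replaced by an index-arithmetic formulation over a precomputed indent table: build indents once, collect all matching indices by a comprehension and take the first, compute the stop index as the first k in range(j+1,n) whose table entry is <= indents[j] (next with default n), then slice lines[j:stop] and join the dedented block.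
import Mathlib
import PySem

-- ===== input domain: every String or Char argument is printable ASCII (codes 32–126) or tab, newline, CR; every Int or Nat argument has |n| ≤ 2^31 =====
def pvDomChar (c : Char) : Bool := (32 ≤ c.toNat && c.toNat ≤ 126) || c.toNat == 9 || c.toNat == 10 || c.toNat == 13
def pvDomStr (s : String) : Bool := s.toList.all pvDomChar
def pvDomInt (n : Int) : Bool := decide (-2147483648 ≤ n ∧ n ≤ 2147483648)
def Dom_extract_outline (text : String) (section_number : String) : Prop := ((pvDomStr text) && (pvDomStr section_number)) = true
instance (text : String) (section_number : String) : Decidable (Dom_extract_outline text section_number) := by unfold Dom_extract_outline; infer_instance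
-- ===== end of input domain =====

-- B replaces A's single stateful loop (matching flag + cross-iteration indent + early return) by index
-- arithmetic over a precomputed indent table: first matching index, first stop index via range, slice and join.


-- i = len(line) - len(line.lstrip())  (both Pythons compute this same expression)
def pvIndent (line : List Char) : Nat := line.length - (PySem.Chars.lstrip line).length

-- ===== PORT A =====
-- the for-loop after `matching` became True: `if indent >= i: return outline; outline += line[indent:]+'\n'`
def pvALoopM (indent : Nat) : List (List Char) → List Char → List Char
  | [], outline => outline
  | line :: rest, outline =>
    let i := pvIndent line
    if indent ≥ i then outline
    else pvALoopM indent rest (outline ++ PySem.Chars.slice line (some (indent : Int)) none ++ ['\n'])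

-- the for-loop while `matching` is False
def pvALoop (sn : List Char) : List (List Char) → List Char → List Char
  | [], outline => outline
  | line :: rest, outline =>
    let i := pvIndent line
    if PySem.Chars.startswith (PySem.Chars.lstrip line) sn then
      pvALoopM i rest (outline ++ PySem.Chars.slice line (some (i : Int)) none ++ ['\n'])
    else pvALoop sn rest outline

def extract_outline (text : String) (section_number : String) : String :=
  String.ofList (pvALoop section_number.toList (PySem.Chars.splitOn text.toList ['\n']) [])

-- ===== PORT B =====
-- indents = [len(l) - len(l.lstrip()) for l in lines]; matches = [k for k, l in enumerate(lines) if …];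
-- stop = next((k for k in range(j+1, len(lines)) if indents[k] <= indents[j]), len(lines));
-- ''.join(l[indents[j]:] + '\n' for l in lines[j:stop])
def extract_outline_alt (text : String) (section_number : String) : String :=
  let lines := PySem.Chars.splitOn text.toList ['\n']
  let indents := lines.map pvIndent
  let matchesL := (PySem.List.enumerate lines 0).filter
    (fun p => PySem.Chars.startswith (PySem.Chars.lstrip p.2) section_number.toList)
  match matchesL.head? with
  | none => ""
  | some (j, _) =>
    let n : Int := lines.length
    let stop : Int := (((PySem.List.pyRange (j + 1) n 1).filter
        (fun k => decide (PySem.List.pyGetD indents k 0 ≤ PySem.List.pyGetD indents j 0))).head?).getD n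
    String.ofList (PySem.Chars.join []
      ((PySem.List.slice lines (some j) (some stop)).map
        (fun l => PySem.Chars.slice l (some ((PySem.List.pyGetD indents j 0 : Nat) : Int)) none ++ ['\n'])))

-- ===== PRECONDITION & SPEC =====
def Spec_extract_outline (text : String) (section_number : String) (out : String) : Prop := out = extract_outline_alt text section_number
instance (text : String) (section_number : String) (out : String) : Decidable (Spec_extract_outline text section_number out) := by unfold Spec_extract_outline; infer_instance

-- ===== CLAIM (what is proved, stated in full; the proofs are below) =====
def Claim_equal_extract_outline : Prop := ∀ (text : String) (section_number : String), Dom_extract_outline text section_number → Spec_extract_outline text section_number (extract_outline text section_number)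

-- ===== LEMMAS AND PROOFS =====

-- proof-only canonical form: first matching line with its index and the lines after it
def pvFind (q : List Char → Bool) : List (List Char) → Option (Nat × List Char × List (List Char))
  | [] => none
  | line :: rest =>
    if q line then some (0, line, rest)
    else (pvFind q rest).map (fun t => (t.1 + 1, t.2.1, t.2.2))

-- proof-only canonical form of the tail block, as in the hinted decomposition
def pvBTake (indent : Nat) : List (List Char) → List (List Char)
  | [] => []
  | line :: rest =>
    if pvIndent line ≤ indent then []
    else PySem.Chars.slice line (some (indent : Int)) none :: pvBTake indent rest

lemma pvFind_drop (q : List Char → Bool) (lines : List (List Char)) (i : Nat)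
    (line : List Char) (rest : List (List Char)) (h : pvFind q lines = some (i, line, rest)) :
    lines.drop i = line :: rest := by
  induction lines generalizing i with
  | nil => simp [pvFind] at h
  | cons l r ih =>
    simp only [pvFind] at h
    by_cases hq : q l = true
    · simp [hq] at h; obtain ⟨h1, h2, h3⟩ := h; subst h1 h2 h3; simp
    · cases hf : pvFind q r with
      | none => simp [hq, hf] at h
      | some t =>
        obtain ⟨ti, tl, tr⟩ := t
        simp [hq, hf] at h
        obtain ⟨h1, h2, h3⟩ := h
        subst h2
        subst h3
        have hd := ih ti hf
        have hi : i = ti + 1 := by omega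
        subst hi
        simpa using hd

lemma enumFind (q : List Char → Bool) (lines : List (List Char)) (s : Int) :
    List.find? (fun p => q p.2) (PySem.List.enumerate lines s) =
      (pvFind q lines).map (fun t => (s + t.1, t.2.1)) := by
  induction lines generalizing s with
  | nil => simp [pvFind, PySem.List.enumerate_nil]
  | cons l r ih =>
    simp only [pvFind, PySem.List.enumerate_cons, List.find?_cons]
    by_cases hq : q l = true
    · simp [hq]
    · simp only [hq, Bool.false_eq_true, if_false, ih (s+1)]
      cases h : pvFind q r with
      | none => simp
      | some t => simp; ring

lemma take_length_takeWhile {α : Type} (p : α → Bool) (l : List α) :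
    l.take (l.takeWhile p).length = l.takeWhile p := by
  induction l with
  | nil => simp
  | cons a t ih =>
    by_cases h : p a = true <;> simp [h, ih]

lemma mapIndent_getD (lines : List (List Char)) (i : Nat) (line : List Char)
    (rest : List (List Char)) (h : lines.drop i = line :: rest) :
    (lines.map pvIndent).getD i 0 = pvIndent line := by
  have h0 : lines[i]? = some line := by
    have h1 : (lines.drop i)[0]? = some line := by rw [h]; rfl
    simp only [List.getElem?_drop, Nat.add_zero] at h1
    exact h1
  simp [List.getD_eq_getElem?_getD, List.getElem?_map, h0]

lemma stopLemma (lines : List (List Char)) (ind : Nat) (rest : List (List Char)) :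
    ∀ (i : Nat), i + 1 ≤ lines.length → lines.drop (i+1) = rest →
    (((List.find? (fun k => decide (PySem.List.pyGetD (lines.map pvIndent) k 0 ≤ ind))
        (PySem.List.pyRange ((i : Int) + 1) (lines.length : Int) 1)).getD (lines.length : Int)))
      = ((i + 1 + (rest.takeWhile (fun l => decide (ind < pvIndent l))).length : Nat) : Int) := by
  induction rest with
  | nil =>
    intro i hi hdrop
    have hlen : lines.length = i + 1 := by
      have := congrArg List.length hdrop; simp at this; omega
    rw [PySem.List.pyRange_one_eq_nil (by omega)]
    simp [hlen]
  | cons r0 r' ih =>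
    intro i hi hdrop
    have hlt : i + 1 < lines.length := by
      have := congrArg List.length hdrop; simp at this; omega
    have hget : (lines.map pvIndent).getD (i+1) 0 = pvIndent r0 :=
      mapIndent_getD lines (i+1) r0 r' hdrop
    rw [PySem.List.pyRange_one_cons (by omega)]
    rw [List.find?_cons]
    have hcast : ((i : Int) + 1) = ((i + 1 : Nat) : Int) := by push_cast; ring
    have hpy : PySem.List.pyGetD (lines.map pvIndent) ((i : Int) + 1) 0 = pvIndent r0 := by
      rw [hcast, PySem.List.pyGetD_natCast, hget]
    by_cases hle : pvIndent r0 ≤ ind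
    · simp only [hpy, hle, decide_true, Option.getD_some]
      rw [List.takeWhile_cons]
      simp [Nat.not_lt.mpr hle]
    · simp only [hpy, hle, decide_false]
      have hdrop' : lines.drop (i+1+1) = r' := by
        have : lines.drop (i+1+1) = (lines.drop (i+1)).drop 1 := by
          rw [List.drop_drop]
        rw [this, hdrop]; simp
      have := ih (i+1) (by omega) hdrop'
      rw [hcast, this]
      rw [List.takeWhile_cons]
      have hlt2 : ind < pvIndent r0 := by omega
      simp only [hlt2, decide_true, if_true, List.length_cons]
      push_cast; ring

lemma pvJoin_nil_eq_flatten (ps : List (List Char)) : PySem.Chars.join [] ps = ps.flatten := by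
  induction ps with
  | nil => simp [PySem.Chars.join, List.intercalate]
  | cons h t ih => cases t <;> simp_all [PySem.Chars.join, List.intercalate, List.intersperse]

lemma pvBTake_eq_takeWhile (ind : Nat) (rest : List (List Char)) :
    pvBTake ind rest = (rest.takeWhile (fun l => decide (ind < pvIndent l))).map
      (fun l => PySem.Chars.slice l (some (ind : Int)) none) := by
  induction rest with
  | nil => simp [pvBTake]
  | cons r0 r' ih =>
    simp only [pvBTake, List.takeWhile_cons]
    by_cases h : pvIndent r0 ≤ ind
    · simp [h, Nat.not_lt.mpr h]
    · have : ind < pvIndent r0 := by omega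
      simp [h, this, ih]

lemma pvALoopM_eq (indent : Nat) (rest : List (List Char)) :
    ∀ outline, pvALoopM indent rest outline =
      outline ++ ((pvBTake indent rest).map (· ++ ['\n'])).flatten := by
  induction rest with
  | nil => intro o; simp [pvALoopM, pvBTake]
  | cons line rest ih =>
    intro o
    simp only [pvALoopM, pvBTake]
    by_cases h : pvIndent line ≤ indent
    · simp [h]
    · simp only [if_neg h, ih, List.map_cons, List.flatten_cons, List.append_assoc]

lemma pvALoop_eq (sn : List Char) (lines : List (List Char)) :
    ∀ outline, pvALoop sn lines outline =
      outline ++ (match pvFind (fun l => PySem.Chars.startswith (PySem.Chars.lstrip l) sn) lines with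
        | none => []
        | some (_, line, rest) =>
            ((PySem.Chars.slice line (some ((pvIndent line : Nat) : Int)) none :: pvBTake (pvIndent line) rest).map (· ++ ['\n'])).flatten) := by
  induction lines with
  | nil => intro o; simp [pvALoop, pvFind]
  | cons line rest ih =>
    intro o
    simp only [pvALoop, pvFind]
    by_cases h : PySem.Chars.startswith (PySem.Chars.lstrip line) sn = true
    · simp only [if_pos h, pvALoopM_eq, List.map_cons, List.flatten_cons, List.append_assoc]
    · simp only [if_neg h, ih]
      cases hf : pvFind (fun l => PySem.Chars.startswith (PySem.Chars.lstrip l) sn) rest with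
      | none => simp
      | some t => simp

-- ===== VERDICT (by name: the statement is the Claim_ definition above) =====
theorem extract_outline_spec : Claim_equal_extract_outline := by
  intro text sn _
  unfold Spec_extract_outline extract_outline extract_outline_alt
  rw [pvALoop_eq]
  simp only [List.head?_filter]
  rw [enumFind (fun l => PySem.Chars.startswith (PySem.Chars.lstrip l) sn.toList)
      (PySem.Chars.splitOn text.toList ['\n']) 0]
  cases hf : pvFind (fun l => PySem.Chars.startswith (PySem.Chars.lstrip l) sn.toList)
      (PySem.Chars.splitOn text.toList ['\n']) with
  | none => simp
  | some t =>
    obtain ⟨i, line, rest⟩ := t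
    set lines := PySem.Chars.splitOn text.toList ['\n'] with hlines
    have hd : lines.drop i = line :: rest :=
      pvFind_drop _ lines i line rest hf
    have hlen : i < lines.length := by
      by_contra hc
      have : lines.drop i = [] := List.drop_eq_nil_of_le (by omega)
      simp [this] at hd
    simp only [Option.map_some, List.nil_append]
    have hj : (0 : Int) + ((i : Nat) : Int) = ((i : Nat) : Int) := by ring
    simp only [hj]
    have hgi : PySem.List.pyGetD (lines.map pvIndent) ((i : Nat) : Int) 0 = pvIndent line := by
      rw [PySem.List.pyGetD_natCast, mapIndent_getD lines i line rest hd]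
    simp only [hgi]
    have hdrop1 : lines.drop (i+1) = rest := by
      have h2 : lines.drop (i+1) = (lines.drop i).drop 1 := by rw [List.drop_drop]
      rw [h2, hd]; simp
    rw [stopLemma lines (pvIndent line) rest i (by omega) hdrop1]
    have hslice : PySem.List.slice lines (some ((i : Nat) : Int))
        (some ((i + 1 + (rest.takeWhile (fun l => decide (pvIndent line < pvIndent l))).length : Nat) : Int))
        = line :: rest.takeWhile (fun l => decide (pvIndent line < pvIndent l)) := by
      rw [PySem.List.slice_natCast]
      have harith : i + 1 + (rest.takeWhile (fun l => decide (pvIndent line < pvIndent l))).length - i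
          = 1 + (rest.takeWhile (fun l => decide (pvIndent line < pvIndent l))).length := by omega
      rw [harith, hd]
      rw [Nat.add_comm 1, List.take_succ_cons]
      rw [take_length_takeWhile]
    rw [hslice, pvJoin_nil_eq_flatten, pvBTake_eq_takeWhile]
    simp [List.map_map, Function.comp_def]
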